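-- pv_equiv track=rewrite | github.com/marcoaparaujo/algoritmos | exercicio_vetores_07.py | extrair_primeiros_caracteres
-- ===== SOURCE A (Python) =====
-- def extrair_primeiros_caracteres(string, letra):
--     resposta = ''
--     i = 0
--     achou_letra = False
--     while i < len(string) and not achou_letra:
--         if string[i] == letra:
--             achou_letra = True
--         else:
--             resposta = resposta + string[i]
--         i = i + 1
--
--     return resposta
-- ===== SOURCE B (Python) =====
-- def extrair_primeiros_caracteres(string, letra):
--     for i, c in enumerate(string):
--         if c == letra:
--             return string[:i]
--     return string
-- ===== Notes on version B (the rewrite author's own statement) =====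
-- stated objective: faster
-- what changed: Replaces the flag-driven char-by-char string accumulation (quadratic repeated concatenation) with an early-return scan that locates the cut position and returns the whole string or a single slice.
import Mathlib
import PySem

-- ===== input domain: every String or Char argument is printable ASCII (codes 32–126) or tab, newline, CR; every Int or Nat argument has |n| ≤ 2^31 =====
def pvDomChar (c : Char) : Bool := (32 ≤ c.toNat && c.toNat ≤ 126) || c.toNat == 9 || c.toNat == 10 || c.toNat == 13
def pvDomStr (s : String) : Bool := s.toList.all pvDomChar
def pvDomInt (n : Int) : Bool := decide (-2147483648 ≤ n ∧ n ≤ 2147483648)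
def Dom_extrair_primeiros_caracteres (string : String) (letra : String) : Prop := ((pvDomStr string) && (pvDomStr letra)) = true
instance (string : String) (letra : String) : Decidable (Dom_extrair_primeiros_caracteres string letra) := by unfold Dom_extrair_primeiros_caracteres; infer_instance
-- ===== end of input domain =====

-- B replaces A's flag-driven character accumulation with an early-return index
-- scan followed by a single slice (objective: faster, no repeated concatenation).


-- ===== PORT A =====
-- A: while-loop with a found-flag, accumulating the answer by string concatenation.
def pvALoop (letra : String) : List Char → List Char → List Char
  | resposta, [] => resposta
  | resposta, c :: rest =>
      if String.ofList [c] = letra then resposta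
      else pvALoop letra (resposta ++ [c]) rest

def extrair_primeiros_caracteres (string : String) (letra : String) : String :=
  String.ofList (pvALoop letra [] string.toList)

-- ===== PORT B =====
-- B: early-return scan for the cut index; on a hit return the slice string[:i]
-- (i ≥ 0, so the slice is List.take i — exact here), otherwise the whole string.
def pvBFind (letra : String) (i : Nat) : List Char → Option Nat
  | [] => none
  | c :: rest => if String.ofList [c] = letra then some i else pvBFind letra (i + 1) rest

def extrair_primeiros_caracteres_alt (string : String) (letra : String) : String :=
  match pvBFind letra 0 string.toList with
  | some i => String.ofList (string.toList.take i)
  | none => string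

-- ===== PRECONDITION & SPEC =====
def Spec_extrair_primeiros_caracteres (string : String) (letra : String) (out : String) : Prop := out = extrair_primeiros_caracteres_alt string letra
instance (string : String) (letra : String) (out : String) : Decidable (Spec_extrair_primeiros_caracteres string letra out) := by unfold Spec_extrair_primeiros_caracteres; infer_instance

-- ===== CLAIM (what is proved, stated in full; the proofs are below) =====
def Claim_equal_extrair_primeiros_caracteres : Prop := ∀ (string : String) (letra : String), Dom_extrair_primeiros_caracteres string letra → Spec_extrair_primeiros_caracteres string letra (extrair_primeiros_caracteres string letra)

-- ===== LEMMAS AND PROOFS =====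
theorem pvBFind_shift (letra : String) (l : List Char) (i : Nat) :
    pvBFind letra i l = (pvBFind letra 0 l).map (· + i) := by
  induction l generalizing i with
  | nil => simp [pvBFind]
  | cons c rest ih =>
      simp only [pvBFind]
      split
      · simp
      · rw [ih (i + 1), ih 1]
        cases pvBFind letra 0 rest <;> simp <;> omega

theorem pvALoop_eq (letra : String) (l acc : List Char) :
    pvALoop letra acc l =
      acc ++ (match pvBFind letra 0 l with
              | some i => l.take i
              | none => l) := by
  induction l generalizing acc with
  | nil => simp [pvALoop, pvBFind]
  | cons c rest ih =>
      simp only [pvALoop, pvBFind]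
      split
      · simp
      · rw [ih, pvBFind_shift letra rest 1]
        cases pvBFind letra 0 rest <;> simp

-- ===== VERDICT (by name: the statement is the Claim_ definition above) =====
theorem extrair_primeiros_caracteres_spec : Claim_equal_extrair_primeiros_caracteres := by
  intro s letra _
  unfold Spec_extrair_primeiros_caracteres extrair_primeiros_caracteres extrair_primeiros_caracteres_alt
  rw [pvALoop_eq]
  cases pvBFind letra 0 s.toList <;> simp
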